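-- pv_equiv track=rewrite | github.com/Seikened/Semestre_II | AnalisisDeDatos/01_repaso.py | Frase
-- ===== SOURCE A (Python) =====
-- def Frase(frase):
--     listaPalabras = []
--     palabra = ""
--     for i,caracter in enumerate(frase):
--         if caracter == " ":
--             palabra = frase[0:i]
--             listaPalabras.append(palabra)
--     return listaPalabras
-- ===== SOURCE B (Python) =====
-- def Frase(frase):
--     out = []
--     rest = frase
--     cut = 0
--     while True:
--         pos = rest.find(' ')
--         if pos == -1:
--             return out
--         out.append(frase[:cut + pos])
--         rest = rest[pos + 1:]
--         cut += pos + 1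
-- ===== Notes on version B (the rewrite author's own statement) =====
-- stated objective: faster
-- what changed: A scans every character in a Python-level enumerate loop and slices at each space; B jumps directly from space to space with str.find on a shrinking remainder, appending the prefix up to each found space.
import Mathlib
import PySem

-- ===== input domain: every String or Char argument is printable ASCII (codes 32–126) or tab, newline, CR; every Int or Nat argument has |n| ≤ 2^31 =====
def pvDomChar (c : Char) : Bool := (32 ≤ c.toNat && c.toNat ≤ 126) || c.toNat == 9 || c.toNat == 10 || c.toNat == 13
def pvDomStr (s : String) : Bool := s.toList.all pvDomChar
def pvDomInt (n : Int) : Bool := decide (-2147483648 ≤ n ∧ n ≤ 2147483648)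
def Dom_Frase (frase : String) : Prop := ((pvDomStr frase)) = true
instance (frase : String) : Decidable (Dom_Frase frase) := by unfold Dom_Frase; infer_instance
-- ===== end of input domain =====

-- B replaces A's per-character enumerate-and-slice scan with a loop that jumps from
-- space to space via str.find on a shrinking remainder (objective: faster, measured).

-- ===== PORT A =====
def Frase (frase : String) : List String :=
  ((PySem.List.enumerate frase.toList 0).foldl
    (fun (st : List String × String) (ic : Int × Char) =>
      if ic.2 == ' ' then
        let palabra := PySem.Str.slice frase (some 0) (some ic.1)
        (st.1 ++ [palabra], palabra)
      else st)
    ([], "")).1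

-- ===== PORT B =====
-- the while loop of Source B: state (rest, cut, out); terminates because rest shrinks past each space
def FraseAltLoop (frase : String) (rest : String) (cut : Int) (out : List String) : List String :=
  let pos := PySem.Str.find rest " "
  if pos == -1 then out
  else
    FraseAltLoop frase (PySem.Str.slice rest (some (pos + 1)) none) (cut + pos + 1)
      (out ++ [PySem.Str.slice frase none (some (cut + pos))])
termination_by rest.toList.length
decreasing_by
  rename_i h
  have h' : ¬ (PySem.Str.find rest " " == -1) = true := h
  rw [PySem.Str.find_eq] at h'
  simp only [show (" ":String).toList = [' '] from rfl, beq_iff_eq] at h'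
  have h0 : -1 ≤ PySem.Chars.find rest.toList [' '] := PySem.Chars.neg_one_le_find _ _
  have hpos : 0 ≤ PySem.Chars.find rest.toList [' '] := by omega
  have hinf : [' '] <:+: rest.toList :=
    (PySem.Chars.find_nonneg_iff rest.toList [' ']).mp hpos
  have hlen : 1 ≤ rest.toList.length := by
    have := hinf.length_le
    simpa using this
  have hsl : (PySem.Str.slice rest (some (PySem.Str.find rest " " + 1)) none).toList
      = rest.toList.drop (PySem.Str.find rest " " + 1).toNat := by
    rw [PySem.Str.toList_slice, PySem.Chars.slice_eq_listSlice]
    exact PySem.List.slice_from _ (by rw [PySem.Str.find_eq]; simp only [show (" ":String).toList = [' '] from rfl]; omega)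
  rw [hsl, List.length_drop]
  rw [PySem.Str.find_eq]
  simp only [show (" ":String).toList = [' '] from rfl]
  omega

def Frase_alt (frase : String) : List String :=
  FraseAltLoop frase frase 0 []

-- ===== PRECONDITION & SPEC =====
def Spec_Frase (frase : String) (out : List String) : Prop := out = Frase_alt frase
instance (frase : String) (out : List String) : Decidable (Spec_Frase frase out) := by unfold Spec_Frase; infer_instance

-- ===== CLAIM (what is proved, stated in full; the proofs are below) =====
def Claim_equal_Frase : Prop := ∀ (frase : String), Dom_Frase frase → Spec_Frase frase (Frase frase)

-- ===== LEMMAS AND PROOFS =====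

-- the list of prefixes of l cut at each space, as char lists
def spp : List Char → List (List Char)
  | [] => []
  | c :: r => (if c = ' ' then [[]] else []) ++ (spp r).map (c :: ·)

theorem spp_nil_of_no_space (l : List Char) (h : ' ' ∉ l) : spp l = [] := by
  induction l with
  | nil => rfl
  | cons c r ih =>
    simp only [List.mem_cons, not_or] at h
    simp [spp, Ne.symm h.1, ih h.2]

theorem spp_split (a b : List Char) (h : ' ' ∉ a) :
    spp (a ++ ' ' :: b) = a :: (spp b).map ((a ++ [' ']) ++ ·) := by
  induction a with
  | nil => simp [spp]
  | cons c a ih =>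
    simp only [List.mem_cons, not_or] at h
    have hc : c ≠ ' ' := Ne.symm h.1
    simp [spp, hc, ih h.2, List.map_map, Function.comp_def]

theorem infix_singleton_iff (c : Char) (l : List Char) : [c] <:+: l ↔ c ∈ l := by
  constructor
  · intro h; exact h.subset (List.mem_singleton_self c)
  · intro h
    obtain ⟨s, t, rfl⟩ := List.append_of_mem h
    exact ⟨s, t, by simp⟩

-- A's loop over enumerate, generalized over the already-consumed prefix
theorem FraseA_loop (frase : String) (l : List Char) :
    ∀ (pre : List Char), frase.toList = pre ++ l → ∀ (acc : List String) (pal : String),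
    (((PySem.List.enumerate l (pre.length : Int)).foldl
      (fun (st : List String × String) (ic : Int × Char) =>
        if ic.2 == ' ' then
          let palabra := PySem.Str.slice frase (some 0) (some ic.1)
          (st.1 ++ [palabra], palabra)
        else st)
      (acc, pal)).1).map String.toList
      = acc.map String.toList ++ (spp l).map (pre ++ ·) := by
  induction l with
  | nil => intro pre _ acc pal; simp [PySem.List.enumerate, spp]
  | cons c r ih =>
    intro pre hpre acc pal
    rw [PySem.List.enumerate_cons, List.foldl_cons]
    have hpre' : frase.toList = (pre ++ [c]) ++ r := by simpa using hpre
    have hlen' : ((pre ++ [c]).length : Int) = (pre.length : Int) + 1 := by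
      simp
    by_cases hc : c = ' '
    · simp only [hc, beq_self_eq_true, if_true]
      have := ih (pre ++ [c]) hpre'
      rw [hlen'] at this
      rw [this (acc ++ [PySem.Str.slice frase (some 0) (some (pre.length : Int))]) _]
      have hsl : (PySem.Str.slice frase (some 0) (some (pre.length : Int))).toList = pre := by
        rw [PySem.Str.toList_slice, PySem.Chars.slice_eq_listSlice]
        rw [PySem.List.slice_zero_start, PySem.List.slice_to_natCast, hpre, hc]
        exact List.take_left
      simp [spp, hc, hsl, List.map_map, Function.comp_def]
    · have hcb : (c == ' ') = false := by simpa using hc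
      simp only [hcb, Bool.false_eq_true, if_false]
      have := ih (pre ++ [c]) hpre'
      rw [hlen'] at this
      rw [this acc pal]
      simp [spp, hc, List.map_map, Function.comp_def]

theorem Frase_toList (frase : String) :
    (Frase frase).map String.toList = spp frase.toList := by
  have := FraseA_loop frase frase.toList [] (by simp) [] ""
  simpa [Frase] using this

-- B's loop, by strong induction on the length of the remainder
theorem FraseAlt_loop_spec : ∀ (n : Nat) (frase rest : String) (pre : List Char)
    (out : List String), rest.toList.length = n → frase.toList = pre ++ rest.toList →
    (FraseAltLoop frase rest (pre.length : Int) out).map String.toList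
      = out.map String.toList ++ (spp rest.toList).map (pre ++ ·) := by
  intro n
  induction n using Nat.strong_induction_on with
  | _ n ih =>
    intro frase rest pre out hn hsplit
    rw [FraseAltLoop]
    simp only [PySem.Str.find_eq, show (" ":String).toList = [' '] from rfl]
    by_cases hneg : PySem.Chars.find rest.toList [' '] = -1
    · have hnosp : ' ' ∉ rest.toList := by
        have := (PySem.Chars.find_eq_neg_one_iff rest.toList [' ']).mp hneg
        intro hmem
        exact this ((infix_singleton_iff ' ' rest.toList).mpr hmem)
      simp [hneg, spp_nil_of_no_space _ hnosp]
    · have h0 : -1 ≤ PySem.Chars.find rest.toList [' '] := PySem.Chars.neg_one_le_find _ _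
      have hpos : 0 ≤ PySem.Chars.find rest.toList [' '] := by omega
      have hle : PySem.Chars.find rest.toList [' '] ≤ rest.toList.length :=
        PySem.Chars.find_le_length _ _
      obtain ⟨hpref, hmin⟩ := PySem.Chars.find_spec hpos
      obtain ⟨k, hkc⟩ := Int.eq_ofNat_of_zero_le hpos
      rw [hkc] at hle hpref hmin ⊢
      simp only [Int.toNat_natCast] at hpref hmin
      have hkle : k ≤ rest.toList.length := by exact_mod_cast hle
      have hcond : (((k : Int)) == -1) = false := by
        simp only [beq_eq_false_iff_ne]
        omega
      -- rest = take k ++ ' ' :: drop (k+1)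
      have hdropk : rest.toList.drop k = ' ' :: rest.toList.drop (k + 1) := by
        obtain ⟨t, ht⟩ := hpref
        have h1 : rest.toList.drop k = ' ' :: t := by simpa using ht.symm
        rw [h1]
        congr 1
        have := congrArg (List.drop 1) h1
        simpa [List.drop_drop, Nat.add_comm] using this.symm
      have hklt : k < rest.toList.length := by
        by_contra hge
        rw [List.drop_eq_nil_of_le (by omega)] at hdropk
        exact (List.cons_ne_nil _ _) hdropk.symm
      have hrest : rest.toList = rest.toList.take k ++ ' ' :: rest.toList.drop (k + 1) := by
        conv_lhs => rw [← List.take_append_drop k rest.toList]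
        rw [hdropk]
      have hnosp : ' ' ∉ rest.toList.take k := by
        intro hmem
        obtain ⟨i, hi, hget⟩ := List.getElem_of_mem hmem
        have hik : i < k := by
          simp only [List.length_take] at hi
          omega
        refine hmin i hik ?_
        have hd : rest.toList.drop i = ' ' :: rest.toList.drop (i + 1) := by
          have hil : i < rest.toList.length := by omega
          have hgt : (rest.toList.take k)[i] = rest.toList[i] := List.getElem_take
          rw [hgt] at hget
          rw [List.drop_eq_getElem_cons hil, hget]
        rw [hd]
        exact ⟨_, rfl⟩
      -- pieces of the recursive call
      have hsl_rest : (PySem.Str.slice rest (some ((k : Int) + 1)) none).toList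
          = rest.toList.drop (k + 1) := by
        rw [PySem.Str.toList_slice, PySem.Chars.slice_eq_listSlice,
          PySem.List.slice_from _ (by omega)]
        congr 1
      have hsl_pref : (PySem.Str.slice frase none (some ((pre.length : Int) + (k : Int)))).toList
          = pre ++ rest.toList.take k := by
        rw [PySem.Str.toList_slice, PySem.Chars.slice_eq_listSlice,
          PySem.List.slice_to _ (by omega)]
        have htn : ((pre.length : Int) + (k : Int)).toNat = pre.length + k := by omega
        rw [htn, hsplit, List.take_append]
        rw [List.take_of_length_le (by omega)]
        have harg : pre.length + k - pre.length = k := by omega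
        rw [harg]
      have hsplit' : frase.toList = (pre ++ rest.toList.take k ++ [' ']) ++ rest.toList.drop (k + 1) := by
        rw [hsplit]
        conv_lhs => rw [hrest]
        simp
      have hlen' : (((pre ++ rest.toList.take k ++ [' ']).length : Int))
          = (pre.length : Int) + (k : Int) + 1 := by
        rw [List.length_append, List.length_append, List.length_take,
          Nat.min_eq_left hkle, List.length_singleton]
        push_cast
        ring
      have hrec := ih (rest.toList.drop (k + 1)).length
        (by rw [List.length_drop]; omega) frase
        (PySem.Str.slice rest (some ((k : Int) + 1)) none) (pre ++ rest.toList.take k ++ [' '])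
        (out ++ [PySem.Str.slice frase none (some ((pre.length : Int) + (k : Int)))])
        (by rw [hsl_rest]) (by rw [hsl_rest]; exact hsplit')
      rw [hlen'] at hrec
      simp only [hcond, Bool.false_eq_true, if_false]
      rw [hrec, hsl_rest]
      -- now the spec side
      conv_rhs => rw [hrest]
      rw [spp_split _ _ hnosp]
      simp [hsl_pref, List.map_map, Function.comp_def]

theorem FraseAlt_toList (frase : String) :
    (Frase_alt frase).map String.toList = spp frase.toList := by
  have := FraseAlt_loop_spec frase.toList.length frase frase [] [] rfl (by simp)
  simpa [Frase_alt] using this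

-- ===== VERDICT (by name: the statement is the Claim_ definition above) =====
theorem Frase_spec : Claim_equal_Frase := by
  intro frase _
  unfold Spec_Frase
  have h : (Frase frase).map String.toList = (Frase_alt frase).map String.toList := by
    rw [Frase_toList, FraseAlt_toList]
  exact List.map_injective_iff.mpr (fun a b hab => String.toList_inj.mp hab) h
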